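-- pv_equiv track=rewrite | github.com/praise002/Automating-the-boring-stuff-with-Python-blog-project | chapter-9/backup-folder-into-zip-file/ideas-for-similar-program/greatest-num-files.py | find_max_folder
-- ===== SOURCE A (Python) =====
-- def find_max_folder(folder_lengths):
--     max_length = 0
--     max_folders = []
--
--     # loop through the dictionary
--     for folder_name, length in folder_lengths.items():
--         if length > max_length:
--             max_folders = [folder_name]
--             max_length = length
--         elif length == max_length:
--             max_folders.append(folder_name)
--
--     return max_folders, max_length
-- ===== SOURCE B (Python) =====
-- def find_max_folder(folder_lengths):
--     max_length = max([0] + list(folder_lengths.values()))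
--     max_folders = [name for name, length in folder_lengths.items() if length == max_length]
--     return max_folders, max_length
-- ===== Notes on version B (the rewrite author's own statement) =====
-- stated objective: simpler
-- what changed: Replaces the online running-max accumulation with reset/append branching by a two-pass max-then-filter: compute the winning length (floored at 0) in one pass, then keep the names matching it.
import Mathlib
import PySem

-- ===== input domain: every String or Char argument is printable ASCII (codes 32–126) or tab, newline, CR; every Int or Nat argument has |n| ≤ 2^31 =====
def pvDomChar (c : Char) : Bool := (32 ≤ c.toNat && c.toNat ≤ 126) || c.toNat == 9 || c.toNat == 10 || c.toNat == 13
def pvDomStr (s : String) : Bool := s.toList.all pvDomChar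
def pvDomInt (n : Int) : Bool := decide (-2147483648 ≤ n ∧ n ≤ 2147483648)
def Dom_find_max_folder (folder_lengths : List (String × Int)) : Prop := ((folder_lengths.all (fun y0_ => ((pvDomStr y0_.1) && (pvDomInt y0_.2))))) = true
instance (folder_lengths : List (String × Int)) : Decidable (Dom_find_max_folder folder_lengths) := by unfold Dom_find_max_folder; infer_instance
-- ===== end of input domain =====

-- ===== PORT A =====
-- A: online running max with reset/append branches, folded over the items in order.
def stepA (acc : List String × Int) (p : String × Int) : List String × Int :=
  if p.2 > acc.2 then ([p.1], p.2)
  else if p.2 == acc.2 then (acc.1 ++ [p.1], acc.2)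
  else acc

def find_max_folder (folder_lengths : List (String × Int)) : List String × Int :=
  folder_lengths.foldl stepA ([], 0)

-- ===== PORT B =====
-- B: two passes — max of the values floored at 0, then filter the names equal to it (simpler decomposition).
def find_max_folder_alt (folder_lengths : List (String × Int)) : List String × Int :=
  let max_length : Int := (0 :: folder_lengths.map Prod.snd).foldl max 0 |> (fun m => m)
  ((folder_lengths.filter (fun p => p.2 == max_length)).map Prod.fst, max_length)

-- ===== PRECONDITION & SPEC =====
def Spec_find_max_folder (folder_lengths : List (String × Int)) (out : List String × Int) : Prop := out = find_max_folder_alt folder_lengths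
instance (folder_lengths : List (String × Int)) (out : List String × Int) : Decidable (Spec_find_max_folder folder_lengths out) := by unfold Spec_find_max_folder; infer_instance

-- ===== CLAIM (what is proved, stated in full; the proofs are below) =====
def Claim_equal_find_max_folder : Prop := ∀ (folder_lengths : List (String × Int)), Dom_find_max_folder folder_lengths → Spec_find_max_folder folder_lengths (find_max_folder folder_lengths)

-- ===== LEMMAS AND PROOFS =====

lemma foldl_max_ge (l : List (String × Int)) (m : Int) :
    m ≤ l.foldl (fun a p => max a p.2) m := by
  induction l generalizing m with
  | nil => simp
  | cons h t ih => exact le_trans (le_max_left m h.2) (ih (max m h.2))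

lemma foldA_eq (l : List (String × Int)) : ∀ (fs : List String) (m : Int),
    l.foldl stepA (fs, m) =
      ((if l.foldl (fun a p => max a p.2) m = m then fs else []) ++
        (l.filter (fun p => p.2 == l.foldl (fun a p => max a p.2) m)).map Prod.fst,
       l.foldl (fun a p => max a p.2) m) := by
  induction l with
  | nil => simp
  | cons h t ih =>
    intro fs m
    have hge : max m h.2 ≤ t.foldl (fun a p => max a p.2) (max m h.2) :=
      foldl_max_ge t (max m h.2)
    by_cases h1 : h.2 > m
    · have hmax : max m h.2 = h.2 := by omega
      simp only [List.foldl_cons, stepA, if_pos h1, hmax]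
      rw [ih [h.1] h.2]
      have hne : t.foldl (fun a p => max a p.2) h.2 ≠ m := by
        rw [hmax] at hge; omega
      by_cases h2 : t.foldl (fun a p => max a p.2) h.2 = h.2
      · have hne2 : h.2 ≠ m := by omega
        simp [List.filter, h2, hne, hne2]
      · have : ¬ (h.2 == t.foldl (fun a p => max a p.2) h.2) = true := by
          simp; omega
        simp [List.filter, this, hne, h2]
    · by_cases h2 : h.2 = m
      · have hmax : max m h.2 = m := by omega
        have hb : (h.2 == m) = true := by simp [h2]
        simp only [List.foldl_cons, stepA, if_neg h1, hb, if_true, hmax]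
        rw [ih (fs ++ [h.1]) m]
        by_cases h3 : t.foldl (fun a p => max a p.2) m = m
        · simp [List.filter, h3, h2]
        · have : ¬ (h.2 == t.foldl (fun a p => max a p.2) m) = true := by
            simp; omega
          simp [List.filter, this, h3]
      · have hmax : max m h.2 = m := by omega
        have hb : ¬ (h.2 == m) = true := by simp; omega
        simp only [List.foldl_cons, stepA, if_neg h1, if_neg hb, hmax]
        rw [ih fs m]
        have : ¬ (h.2 == t.foldl (fun a p => max a p.2) m) = true := by
          rw [hmax] at hge; simp; omega
        simp [List.filter, this]

-- ===== VERDICT (by name: the statement is the Claim_ definition above) =====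
theorem find_max_folder_spec : Claim_equal_find_max_folder := by
  intro l _
  unfold Spec_find_max_folder find_max_folder find_max_folder_alt
  rw [foldA_eq l [] 0]
  have : (0 :: l.map Prod.snd).foldl max 0 = l.foldl (fun a p => max a p.2) 0 := by
    simp [List.foldl_map]
  simp only [this]
  split <;> simp
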